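-- pv_equiv track=rewrite | github.com/EgorZamotaev/PythonLabs | Lab3/3.1/main_game.py | outneighbour
-- ===== SOURCE A (Python) =====
-- def outneighbour(neighbours, visited):
--     out = []
--     for i in range(len(neighbours)):
--         if neighbours[i] in visited:
--             out.append(i)
--     out.reverse()
--
--     for i in range(len(out)):
--         neighbours.pop(out[i])
--     return neighbours
-- ===== SOURCE B (Python) =====
-- def outneighbour(neighbours, visited):
--     # Single filtering pass; slice assignment keeps the same list object
--     # (mutation visible to callers, like A's in-place pops).
--     neighbours[:] = [x for x in neighbours if x not in visited]
--     return neighbours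
-- ===== Notes on version B (the rewrite author's own statement) =====
-- stated objective: simpler
-- what changed: Replaced A's two-phase collect-indices/reverse/pop-high-to-low machinery with a single filtering pass written back via slice assignment.
import Mathlib
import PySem

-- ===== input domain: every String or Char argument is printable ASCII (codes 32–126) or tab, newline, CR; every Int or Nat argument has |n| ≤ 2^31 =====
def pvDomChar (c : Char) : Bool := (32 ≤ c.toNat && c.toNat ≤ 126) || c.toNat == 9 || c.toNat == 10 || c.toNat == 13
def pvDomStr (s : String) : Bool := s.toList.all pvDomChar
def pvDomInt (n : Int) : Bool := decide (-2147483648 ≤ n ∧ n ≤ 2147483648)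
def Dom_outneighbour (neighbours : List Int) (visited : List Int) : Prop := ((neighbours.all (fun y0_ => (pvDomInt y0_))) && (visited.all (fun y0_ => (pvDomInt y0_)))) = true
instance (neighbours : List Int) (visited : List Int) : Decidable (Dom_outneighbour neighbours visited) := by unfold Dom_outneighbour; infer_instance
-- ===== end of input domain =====

-- B is a single filtering pass instead of A's collect-indices/reverse/pop machinery; equivalence is
-- about the returned value (both Pythons mutate `neighbours` in place to the same final contents).

-- ===== PORT A =====
def outneighbour (neighbours : List Int) (visited : List Int) : List Int :=
  -- out = []; for i in range(len(neighbours)): if neighbours[i] in visited: out.append(i)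
  let out : List Nat :=
    (List.range neighbours.length).foldl
      (fun acc i =>
        match PySem.List.pyGet? neighbours (Int.ofNat i) with
        | some v => if visited.contains v then acc ++ [i] else acc
        | none => acc) []
  -- out.reverse()
  let out := out.reverse
  -- for i in range(len(out)): neighbours.pop(out[i])   (indices always in range in Python)
  out.foldl
    (fun ns i =>
      match PySem.List.pop? ns (Int.ofNat i) with
      | some (_, rest) => rest
      | none => ns) neighbours

-- ===== PORT B =====
def outneighbour_alt (neighbours : List Int) (visited : List Int) : List Int :=
  neighbours.filter (fun x => !visited.contains x)

-- ===== PRECONDITION & SPEC =====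
def Spec_outneighbour (neighbours : List Int) (visited : List Int) (out : List Int) : Prop := out = outneighbour_alt neighbours visited
instance (neighbours : List Int) (visited : List Int) (out : List Int) : Decidable (Spec_outneighbour neighbours visited out) := by unfold Spec_outneighbour; infer_instance

-- ===== CLAIM (what is proved, stated in full; the proofs are below) =====
def Claim_equal_outneighbour : Prop := ∀ (neighbours : List Int) (visited : List Int), Dom_outneighbour neighbours visited → Spec_outneighbour neighbours visited (outneighbour neighbours visited)

-- ===== LEMMAS AND PROOFS =====

/-- The pop loop of port A, as a named function for the lemmas. -/
def popAll (ids : List Nat) (ns : List Int) : List Int :=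
  ids.foldl
    (fun ns i =>
      match PySem.List.pop? ns (Int.ofNat i) with
      | some (_, rest) => rest
      | none => ns) ns

theorem pop?_ofNat_ge {α : Type} (xs : List α) (n : Nat) (h : xs.length ≤ n) :
    PySem.List.pop? xs (Int.ofNat n) = none := by
  simp [PySem.List.pop?, PySem.List.pyIdx?]
  omega

theorem popAll_shift (ids : List Nat) (a : Int) (l : List Int) :
    popAll (ids.map Nat.succ) (a :: l) = a :: popAll ids l := by
  induction ids generalizing l with
  | nil => rfl
  | cons i ids ih =>
    by_cases h : i < l.length
    · have h1 : i + 1 < (a :: l).length := by simp; omega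
      simp only [popAll, List.map_cons, List.foldl_cons]
      have e1 : PySem.List.pop? (a :: l) (Int.ofNat (Nat.succ i)) =
          some ((a :: l)[i+1], (a :: l).eraseIdx (i+1)) := by
        exact_mod_cast PySem.List.pop?_natCast (a :: l) (i+1) h1
      have e2 : PySem.List.pop? l (Int.ofNat i) = some (l[i], l.eraseIdx i) := by
        exact_mod_cast PySem.List.pop?_natCast l i h
      rw [e1, e2]
      simpa [popAll, List.eraseIdx_cons_succ] using ih (l.eraseIdx i)
    · simp only [popAll, List.map_cons, List.foldl_cons]
      have e1 : PySem.List.pop? (a :: l) (Int.ofNat (Nat.succ i)) = none := by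
        apply pop?_ofNat_ge; simp; omega
      have e2 : PySem.List.pop? l (Int.ofNat i) = none := by
        apply pop?_ofNat_ge; omega
      rw [e1, e2]
      exact ih l

theorem popAll_append (xs ys : List Nat) (ns : List Int) :
    popAll (xs ++ ys) ns = popAll ys (popAll xs ns) := by
  simp [popAll, List.foldl_append]

/-- Popping, from high index to low, exactly the positions whose element lies in `visited`
    leaves the elements not in `visited`, in order. -/
theorem popAll_filter (visited : List Int) (l : List Int) :
    popAll (((List.range l.length).filter
        (fun i => visited.contains (l.getD i 0))).reverse) l
      = l.filter (fun x => !visited.contains x) := by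
  induction l with
  | nil => rfl
  | cons a l ih =>
    have hrange : List.range (a :: l).length = 0 :: (List.range l.length).map Nat.succ := by
      simp [List.range_succ_eq_map]
    rw [hrange]
    rw [List.filter_cons]
    by_cases ha : visited.contains a
    · simp only [List.getD_cons_zero, ha, if_pos]
      have : ((List.range l.length).map Nat.succ).filter
            (fun i => visited.contains ((a :: l).getD i 0))
          = ((List.range l.length).filter (fun i => visited.contains (l.getD i 0))).map Nat.succ := by
        rw [List.filter_map]; rfl
      rw [this]
      have hmapped : ∀ (F : List Nat), (0 :: F.map Nat.succ).reverse = F.reverse.map Nat.succ ++ [0] := by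
        intro F; simp
      rw [hmapped, popAll_append, popAll_shift, ih]
      simp [popAll, PySem.List.pop?_zero_cons, List.filter_cons]
      exact (by simpa using ha)
    · simp only [List.getD_cons_zero, ha, if_neg, Bool.false_eq_true, not_false_iff]
      have : ((List.range l.length).map Nat.succ).filter
            (fun i => visited.contains ((a :: l).getD i 0))
          = ((List.range l.length).filter (fun i => visited.contains (l.getD i 0))).map Nat.succ := by
        rw [List.filter_map]; rfl
      rw [this]
      have : (((List.range l.length).filter (fun i => visited.contains (l.getD i 0))).map Nat.succ).reverse
          = ((List.range l.length).filter (fun i => visited.contains (l.getD i 0))).reverse.map Nat.succ := by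
        simp
      rw [this, popAll_shift, ih]
      simp [List.filter_cons]
      exact (by simpa using ha)

theorem collect_eq (neighbours visited : List Int) :
    (List.range neighbours.length).foldl
      (fun acc i =>
        match PySem.List.pyGet? neighbours (Int.ofNat i) with
        | some v => if visited.contains v then acc ++ [i] else acc
        | none => acc) []
    = (List.range neighbours.length).filter
        (fun i => visited.contains (neighbours.getD i 0)) := by
  have h1 := PySem.List.foldl_congr_mem (List.range neighbours.length)
    (fun acc i =>
      match PySem.List.pyGet? neighbours (Int.ofNat i) with
      | some v => if visited.contains v then acc ++ [i] else acc
      | none => acc)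
    (fun acc i => if visited.contains (neighbours.getD i 0) then acc ++ [i] else acc)
    []
    (by
      intro acc i hi
      have h : i < neighbours.length := List.mem_range.mp hi
      have hg : PySem.List.pyGet? neighbours (Int.ofNat i) = some neighbours[i] :=
        PySem.List.pyGet?_ofNat (xs := neighbours) (n := i) h
      simp only [hg]
      simp [List.getD_eq_getElem?_getD, List.getElem?_eq_getElem h])
  rw [h1]
  simpa using PySem.List.foldl_append_if_eq_filter
    (fun i => visited.contains (neighbours.getD i 0))
    (List.range neighbours.length) []

-- ===== VERDICT (by name: the statement is the Claim_ definition above) =====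
theorem outneighbour_spec : Claim_equal_outneighbour := by
  intro neighbours visited _
  show outneighbour neighbours visited = outneighbour_alt neighbours visited
  unfold outneighbour outneighbour_alt
  rw [collect_eq]
  exact popAll_filter visited neighbours
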